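-- pv_equiv track=rewrite | github.com/adafruit/Adafruit_CircuitPython_SGP41 | adafruit_sgp41/gas_index_algorithm.py | _fix16_div
-- ===== SOURCE A (Python) =====
-- _FIX16_MINIMUM = -0x80000000
--
-- _FIX16_OVERFLOW = -0x80000000
--
-- def _to_int32(u: int) -> int:
--     u &= 0xFFFFFFFF
--     return u if u < 0x80000000 else u - 0x100000000
--
-- def _fix16_div(a: int, b: int) -> int:
--     """Bit-exact port of libfixmath fix16_div."""
--     if b == 0:
--         return _FIX16_MINIMUM
--     remainder = a if a >= 0 else -a
--     divider = b if b >= 0 else -b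
--     quotient = 0
--     bit = 0x10000
--     while divider < remainder:
--         divider <<= 1
--         bit <<= 1
--     if not bit:
--         return _FIX16_OVERFLOW
--     if divider & 0x80000000:
--         if remainder >= divider:
--             quotient |= bit
--             remainder -= divider
--         divider >>= 1
--         bit >>= 1
--     while bit and remainder:
--         if remainder >= divider:
--             quotient |= bit
--             remainder -= divider
--         remainder <<= 1
--         bit >>= 1
--     # rounding
--     if remainder >= divider:
--         quotient += 1
--     result = quotient
--     if (a < 0) != (b < 0):
--         if result == 0x80000000:
--             return _FIX16_OVERFLOW
--         result = -result
--     return _to_int32(result & 0xFFFFFFFF)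
-- ===== SOURCE B (Python) =====
-- _FIX16_MINIMUM = -0x80000000
--
-- _FIX16_OVERFLOW = -0x80000000
--
-- def _to_int32(u: int) -> int:
--     u &= 0xFFFFFFFF
--     return u if u < 0x80000000 else u - 0x100000000
--
-- def _fix16_div(a: int, b: int) -> int:
--     """Q16.16 division via a single divmod with round-half-up (no bit loop)."""
--     if b == 0:
--         return _FIX16_MINIMUM
--     num = abs(a) << 16
--     den = abs(b)
--     q, r = divmod(num, den)
--     if 2 * r >= den:
--         q += 1
--     if (a < 0) != (b < 0):
--         if q == 0x80000000:
--             return _FIX16_OVERFLOW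
--         q = -q
--     return _to_int32(q & 0xFFFFFFFF)
-- ===== Notes on version B (the rewrite author's own statement) =====
-- stated objective: simpler
-- what changed: Replaces the shift-and-subtract restoring long division (scale-up loop plus ~17-48 single-bit quotient iterations with an explicit bit-31 overflow step) by one divmod on abs(a)<<16 with a round-half-up correction, keeping the identical sign/overflow/masking tail.
import Mathlib
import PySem

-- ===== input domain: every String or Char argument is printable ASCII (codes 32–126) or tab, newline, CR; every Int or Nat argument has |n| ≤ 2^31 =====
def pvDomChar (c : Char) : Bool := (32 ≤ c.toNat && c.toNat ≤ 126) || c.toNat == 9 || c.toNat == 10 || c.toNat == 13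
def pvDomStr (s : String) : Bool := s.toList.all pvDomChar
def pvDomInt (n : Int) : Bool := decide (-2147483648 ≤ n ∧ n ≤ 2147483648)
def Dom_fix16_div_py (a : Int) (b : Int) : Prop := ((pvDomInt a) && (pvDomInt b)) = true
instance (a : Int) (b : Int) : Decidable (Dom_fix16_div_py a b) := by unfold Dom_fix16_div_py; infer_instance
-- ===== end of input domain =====

-- B replaces A's bit-by-bit restoring long division by a single divmod with round-half-up; same sign/overflow/masking tail.

-- ===== PORT A =====
-- _to_int32: Python 'u &= 0xFFFFFFFF' on an int is exactly 'emod 2^32' (hand-ported; exact on all Int)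
def pyToInt32 (u : Int) : Int :=
  let u2 := u.emod 4294967296
  if u2 < 2147483648 then u2 else u2 - 4294967296

-- 'while divider < remainder: divider <<= 1; bit <<= 1' (values are nonnegative ints, kept as Nat;
-- the 0 < div hypothesis records that |b| > 0, without which the Python loop would not terminate)
def fixLoop1 (rem div bit : Nat) (h : 0 < div) : Nat × Nat :=
  if div < rem then fixLoop1 rem (div * 2) (bit * 2) (by omega) else (div, bit)
termination_by rem - div
decreasing_by omega

-- 'while bit and remainder: if remainder >= divider: quotient |= bit; remainder -= divider; remainder <<= 1; bit >>= 1'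
def fixLoop2 (rem div quot bit : Nat) : Nat × Nat :=
  if bit ≠ 0 ∧ rem ≠ 0 then
    if div ≤ rem then fixLoop2 ((rem - div) * 2) div (quot ||| bit) (bit / 2)
    else fixLoop2 (rem * 2) div quot (bit / 2)
  else (quot, rem)
termination_by bit
decreasing_by all_goals omega

def fix16_div_py (a : Int) (b : Int) : Int :=
  if hb : b = 0 then -2147483648
  else
    let remainder : Nat := a.natAbs       -- a if a >= 0 else -a
    let db := fixLoop1 remainder b.natAbs 65536 (Int.natAbs_pos.mpr hb)
    let divider := db.1
    let bit := db.2
    if bit = 0 then -2147483648           -- 'if not bit: return _FIX16_OVERFLOW'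
    else
      -- 'if divider & 0x80000000: ...' ; state s = (remainder, divider, quotient, bit) afterwards
      let s :=
        if divider &&& 2147483648 ≠ 0 then
          if divider ≤ remainder then (remainder - divider, divider / 2, (0 : Nat) ||| bit, bit / 2)
          else (remainder, divider / 2, (0 : Nat), bit / 2)
        else (remainder, divider, (0 : Nat), bit)
      let qr := fixLoop2 s.1 s.2.1 s.2.2.1 s.2.2.2
      let quotient := if s.2.1 ≤ qr.2 then qr.1 + 1 else qr.1   -- rounding
      let result : Int := (quotient : Int)
      if (decide (a < 0)) != (decide (b < 0)) then
        if result = 2147483648 then -2147483648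
        else pyToInt32 ((-result).emod 4294967296)   -- 'result & 0xFFFFFFFF' = emod 2^32 (exact)
      else pyToInt32 (result.emod 4294967296)

-- ===== PORT B =====
def fix16_div_py_alt (a : Int) (b : Int) : Int :=
  if b = 0 then -2147483648
  else
    let num : Nat := a.natAbs * 65536     -- abs(a) << 16
    let den : Nat := b.natAbs
    let q := if den ≤ 2 * (num % den) then num / den + 1 else num / den   -- divmod + '2 * r >= den' round half up
    if (decide (a < 0)) != (decide (b < 0)) then
      if (q : Int) = 2147483648 then -2147483648
      else pyToInt32 ((-(q : Int)).emod 4294967296)   -- 'q & 0xFFFFFFFF' = emod 2^32 (exact)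
    else pyToInt32 ((q : Int).emod 4294967296)

-- ===== PRECONDITION & SPEC =====
def Spec_fix16_div_py (a : Int) (b : Int) (out : Int) : Prop := out = fix16_div_py_alt a b
instance (a : Int) (b : Int) (out : Int) : Decidable (Spec_fix16_div_py a b out) := by unfold Spec_fix16_div_py; infer_instance

-- ===== CLAIM (what is proved, stated in full; the proofs are below) =====
def Claim_equal_fix16_div_py : Prop := ∀ (a : Int) (b : Int), Dom_fix16_div_py a b → Spec_fix16_div_py a b (fix16_div_py a b)

-- ===== LEMMAS AND PROOFS =====

-- quotient bits already produced live strictly above the current bit, so '|=' is '+'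
theorem lor_pow_add (j m : Nat) : (2 ^ (j + 1) * m) ||| 2 ^ j = 2 ^ (j + 1) * m + 2 ^ j := by
  apply Nat.eq_of_testBit_eq
  intro i
  rw [Nat.testBit_lor, Nat.testBit_two_pow_mul,
      show 2 ^ (j + 1) * m + 2 ^ j = 2 ^ j * (2 * m + 1) by ring,
      Nat.testBit_two_pow_mul, Nat.testBit_two_pow]
  rcases lt_trichotomy i j with h | h | h
  · simp [show ¬ (i ≥ j) from by omega, show ¬ (i ≥ j + 1) from by omega,
          show j ≠ i from by omega]
  · subst h
    simp [show ¬ (i ≥ i + 1) from by omega, Nat.testBit_zero]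
  · have hi : i = j + 1 + (i - j - 1) := by omega
    rw [hi]
    simp only [show j + 1 + (i - j - 1) ≥ j + 1 from by omega,
               show j + 1 + (i - j - 1) ≥ j from by omega,
               show j ≠ j + 1 + (i - j - 1) from by omega,
               decide_true, Bool.true_and, decide_false, Bool.or_false]
    rw [show j + 1 + (i - j - 1) - (j + 1) = i - j - 1 from by omega,
        show j + 1 + (i - j - 1) - j = (i - j - 1) + 1 from by omega,
        Nat.testBit_succ]
    rw [show (2 * m + 1) / 2 = m from by omega]

theorem loop2_zero (div quot bit : Nat) : fixLoop2 0 div quot bit = (quot, 0) := by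
  rw [fixLoop2]; simp

-- characterisation of the main restoring-division loop
theorem loop2_spec (j : Nat) : ∀ (div m rem : Nat), 0 < div → rem < 2 * div →
    fixLoop2 rem div (2 ^ (j + 1) * m) (2 ^ j) =
      (2 ^ (j + 1) * m + (2 ^ j * rem) / div, 2 * ((2 ^ j * rem) % div)) := by
  induction j with
  | zero =>
    intro div m rem hd hr
    rw [fixLoop2]
    by_cases hz : rem = 0
    · subst hz; simp
    · have hc : (2 : Nat) ^ 0 ≠ 0 ∧ rem ≠ 0 := ⟨by norm_num, hz⟩
      rw [if_pos hc]
      have hb0 : (2 : Nat) ^ 0 / 2 = 0 := by norm_num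
      by_cases hle : div ≤ rem
      · rw [if_pos hle, hb0, fixLoop2,
            if_neg (show ¬ ((0 : Nat) ≠ 0 ∧ (rem - div) * 2 ≠ 0) from by simp)]
        rw [lor_pow_add 0 m]
        have hdiv : 2 ^ 0 * rem / div = 1 := by
          rw [pow_zero, one_mul]; exact Nat.div_eq_of_lt_le (by omega) (by omega)
        have hmod : 2 ^ 0 * rem % div = rem - div := by
          rw [pow_zero, one_mul, Nat.mod_eq_sub_mod hle, Nat.mod_eq_of_lt (by omega)]
        rw [hdiv, hmod]
        simp only [Prod.mk.injEq]
        exact ⟨by norm_num, by omega⟩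
      · rw [if_neg hle, hb0, fixLoop2,
            if_neg (show ¬ ((0 : Nat) ≠ 0 ∧ rem * 2 ≠ 0) from by simp)]
        have hdiv : 2 ^ 0 * rem / div = 0 := by
          rw [pow_zero, one_mul]; exact Nat.div_eq_of_lt (by omega)
        have hmod : 2 ^ 0 * rem % div = rem := by
          rw [pow_zero, one_mul]; exact Nat.mod_eq_of_lt (by omega)
        rw [hdiv, hmod]
        simp only [Prod.mk.injEq]
        exact ⟨by norm_num, by omega⟩
  | succ j ih =>
    intro div m rem hd hr
    rw [fixLoop2]
    by_cases hz : rem = 0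
    · subst hz; simp
    · have hc : (2 : Nat) ^ (j + 1) ≠ 0 ∧ rem ≠ 0 := ⟨by positivity, hz⟩
      rw [if_pos hc]
      have hbit : (2 : Nat) ^ (j + 1) / 2 = 2 ^ j := by rw [pow_succ]; omega
      by_cases hle : div ≤ rem
      · rw [if_pos hle, hbit]
        have hlor : (2 : Nat) ^ (j + 1 + 1) * m ||| 2 ^ (j + 1) = 2 ^ (j + 1) * (2 * m + 1) := by
          rw [lor_pow_add (j + 1) m]; ring
        rw [hlor, ih div (2 * m + 1) ((rem - div) * 2) hd (by omega)]
        have hle2 : div * 2 ^ (j + 1) ≤ 2 ^ (j + 1) * rem := by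
          rw [mul_comm div]; exact Nat.mul_le_mul_left _ hle
        have e1 : 2 ^ j * ((rem - div) * 2) = 2 ^ (j + 1) * rem - div * 2 ^ (j + 1) := by
          rw [show (2 : Nat) ^ j * ((rem - div) * 2) = 2 ^ (j + 1) * (rem - div) from by
                rw [pow_succ]; ring,
              Nat.mul_sub]
          ring_nf
        have e2 : (2 ^ (j + 1) * rem - div * 2 ^ (j + 1)) / div = 2 ^ (j + 1) * rem / div - 2 ^ (j + 1) :=
          Nat.sub_mul_div _ _ _
        have e3 : (2 ^ (j + 1) * rem - div * 2 ^ (j + 1)) % div = 2 ^ (j + 1) * rem % div :=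
          Nat.sub_mul_mod hle2
        have e4 : 2 ^ (j + 1) ≤ 2 ^ (j + 1) * rem / div :=
          (Nat.le_div_iff_mul_le hd).mpr (Nat.mul_le_mul_left _ hle)
        rw [e1, e2, e3]
        simp only [Prod.mk.injEq]
        refine ⟨?_, trivial⟩
        have e5 : 2 ^ (j + 1) * (2 * m + 1) = 2 ^ (j + 1 + 1) * m + 2 ^ (j + 1) := by ring
        omega
      · rw [if_neg hle, hbit,
            show (2 : Nat) ^ (j + 1 + 1) * m = 2 ^ (j + 1) * (2 * m) from by ring,
            ih div (2 * m) (rem * 2) hd (by omega),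
            show (2 : Nat) ^ j * (rem * 2) = 2 ^ (j + 1) * rem from by rw [pow_succ]; ring]

-- characterisation of the pre-scaling loop: divider and bit get the same minimal power of two
theorem loop1_spec (n : Nat) : ∀ (rem div bit : Nat) (h : 0 < div), rem - div ≤ n →
    ∃ k, fixLoop1 rem div bit h = (div * 2 ^ k, bit * 2 ^ k) ∧ rem ≤ div * 2 ^ k ∧
      (k = 0 ∨ div * 2 ^ k < 2 * rem) := by
  induction n with
  | zero =>
    intro rem div bit h hn
    refine ⟨0, ?_, by simpa using (show rem ≤ div from by omega), Or.inl rfl⟩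
    rw [fixLoop1, if_neg (by omega)]
    simp
  | succ n ih =>
    intro rem div bit h hn
    rw [fixLoop1]
    by_cases hlt : div < rem
    · rw [if_pos hlt]
      obtain ⟨k, h1, h2, h3⟩ := ih rem (div * 2) (bit * 2) (by omega) (by omega)
      refine ⟨k + 1, ?_, ?_, Or.inr ?_⟩
      · rw [h1]; simp only [Prod.mk.injEq]; exact ⟨by ring, by ring⟩
      · calc rem ≤ div * 2 * 2 ^ k := h2
          _ = div * 2 ^ (k + 1) := by ring
      · rcases h3 with h3 | h3
        · subst h3; rw [pow_one]; omega
        · calc div * 2 ^ (k + 1) = div * 2 * 2 ^ k := by ring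
            _ < 2 * rem := h3
    · rw [if_neg hlt]
      exact ⟨0, by simp, by simpa using (show rem ≤ div from by omega), Or.inl rfl⟩

-- bit 31 of a value below 2^32 is set iff the value is at least 2^31
theorem and_bit31 (nn : Nat) (h : nn < 4294967296) :
    (nn &&& 2147483648 ≠ 0) ↔ 2147483648 ≤ nn := by
  have h31 := Nat.and_two_pow nn 31
  rw [Nat.toNat_testBit] at h31
  norm_num at h31
  rw [h31]
  omega

-- the computed (rounded) quotient of A's bit loop equals B's divmod-with-round-half-up quotient
theorem quot_eq (R D : Nat) (hD : 0 < D) (hR : R ≤ 2147483648) (hD2 : D ≤ 2147483648) :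
    (let db := fixLoop1 R D 65536 hD
     let s :=
       if db.1 &&& 2147483648 ≠ 0 then
         if db.1 ≤ R then (R - db.1, db.1 / 2, (0 : Nat) ||| db.2, db.2 / 2)
         else (R, db.1 / 2, (0 : Nat), db.2 / 2)
       else (R, db.1, (0 : Nat), db.2)
     let qr := fixLoop2 s.1 s.2.1 s.2.2.1 s.2.2.2
     if s.2.1 ≤ qr.2 then qr.1 + 1 else qr.1) =
    (if D ≤ 2 * (R * 65536 % D) then R * 65536 / D + 1 else R * 65536 / D) := by
  obtain ⟨k, h1, h2, h3⟩ := loop1_spec (R - D) R D 65536 hD (le_refl _)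
  simp only [h1]
  have hd1pos : 0 < D * 2 ^ k := by positivity
  have hlt32 : D * 2 ^ k < 4294967296 := by
    rcases h3 with h3 | h3
    · subst h3; simp only [pow_zero, mul_one]; omega
    · omega
  have hpow16 : (65536 : Nat) * 2 ^ k = 2 ^ (16 + k) := by
    rw [pow_add]; ring
  by_cases hbit31 : D * 2 ^ k &&& 2147483648 ≠ 0
  · -- divider has bit 31 set: one manual division step, divider and bit halve
    have hge : 2147483648 ≤ D * 2 ^ k := (and_bit31 _ hlt32).mp hbit31
    obtain ⟨e, he⟩ : ∃ e, D * 2 ^ k = 2 * e := by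
      rcases Nat.eq_zero_or_pos k with hk | hk
      · subst hk
        simp only [pow_zero, mul_one] at hge ⊢
        exact ⟨1073741824, by omega⟩
      · obtain ⟨k', rfl⟩ : ∃ k', k = k' + 1 := ⟨k - 1, by omega⟩
        exact ⟨D * 2 ^ k', by ring⟩
    have hepos : 0 < e := by omega
    have hc2 : (2 : Nat) ^ k * D = 2 * e := by rw [mul_comm ((2 : Nat) ^ k) D]; exact he
    rw [if_pos hbit31]
    by_cases hle : D * 2 ^ k ≤ R
    · -- remainder equals divider exactly (remainder ≤ divider always holds after the first loop)
      rw [if_pos hle]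
      have hRe : R = D * 2 ^ k := le_antisymm h2 hle
      subst hRe
      simp only [Nat.sub_self, loop2_zero]
      have hq' : D * 2 ^ k * 65536 / D = 65536 * 2 ^ k := by
        rw [show D * 2 ^ k * 65536 = D * (65536 * 2 ^ k) from by ring,
            Nat.mul_div_cancel_left _ hD]
      have hm' : D * 2 ^ k * 65536 % D = 0 := by
        rw [show D * 2 ^ k * 65536 = D * (65536 * 2 ^ k) from by ring]
        exact Nat.mul_mod_right _ _
      rw [hq', hm', if_neg (show ¬ D * 2 ^ k / 2 ≤ 0 from by omega),
          if_neg (show ¬ D ≤ 2 * 0 from by omega), hpow16]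
      simp
    · rw [if_neg hle]
      have hbithalf : (65536 : Nat) * 2 ^ k / 2 = 2 ^ (15 + k) := by
        rw [show (65536 : Nat) * 2 ^ k = 2 * 2 ^ (15 + k) from by rw [pow_add]; ring]
        omega
      rw [hbithalf, he, Nat.mul_div_cancel_left e (by norm_num)]
      have hl := loop2_spec (15 + k) e 0 R hepos (by omega)
      simp only [mul_zero, zero_add] at hl
      rw [hl]
      have key_div : 2 ^ (15 + k) * R / e = R * 65536 / D := by
        rw [show R * 65536 / D = 2 ^ k * (R * 65536) / (2 ^ k * D) from
              (Nat.mul_div_mul_left _ _ (by positivity)).symm,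
            show (2 : Nat) ^ k * (R * 65536) = 2 * (2 ^ (15 + k) * R) from by rw [pow_add]; ring,
            hc2, Nat.mul_div_mul_left _ _ (by norm_num)]
      have key_mod : 2 * (2 ^ (15 + k) * R % e) = 2 ^ k * (R * 65536 % D) := by
        rw [← Nat.mul_mod_mul_left (2 ^ k) (R * 65536) D,
            show (2 : Nat) ^ k * (R * 65536) = 2 * (2 ^ (15 + k) * R) from by rw [pow_add]; ring,
            hc2, Nat.mul_mod_mul_left]
      rw [key_div, key_mod]
      have hiff : (e ≤ 2 ^ k * (R * 65536 % D)) ↔ (D ≤ 2 * (R * 65536 % D)) := by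
        constructor
        · intro hx
          have h2x : 2 * e ≤ 2 * (2 ^ k * (R * 65536 % D)) := by omega
          rw [← hc2] at h2x
          have h2y : 2 ^ k * D ≤ 2 ^ k * (2 * (R * 65536 % D)) :=
            le_trans h2x (le_of_eq (by ring))
          exact Nat.le_of_mul_le_mul_left h2y (by positivity)
        · intro hx
          have h2y := Nat.mul_le_mul_left (2 ^ k) hx
          rw [hc2] at h2y
          have h2z : 2 * e ≤ 2 * (2 ^ k * (R * 65536 % D)) :=
            le_trans h2y (le_of_eq (by ring))
          omega
      exact if_congr hiff rfl rfl
  · rw [if_neg hbit31, hpow16]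
    have hl := loop2_spec (16 + k) (D * 2 ^ k) 0 R hd1pos (by omega)
    simp only [mul_zero, zero_add] at hl
    rw [hl]
    have key_div : 2 ^ (16 + k) * R / (D * 2 ^ k) = R * 65536 / D := by
      rw [show (2 : Nat) ^ (16 + k) * R = 2 ^ k * (R * 65536) from by rw [pow_add]; ring,
          show D * 2 ^ k = 2 ^ k * D from by ring,
          Nat.mul_div_mul_left _ _ (by positivity)]
    have key_mod : 2 ^ (16 + k) * R % (D * 2 ^ k) = 2 ^ k * (R * 65536 % D) := by
      rw [show (2 : Nat) ^ (16 + k) * R = 2 ^ k * (R * 65536) from by rw [pow_add]; ring,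
          show D * 2 ^ k = 2 ^ k * D from by ring,
          Nat.mul_mod_mul_left]
    rw [key_div, key_mod]
    have hiff : (D * 2 ^ k ≤ 2 * (2 ^ k * (R * 65536 % D))) ↔ (D ≤ 2 * (R * 65536 % D)) := by
      rw [show (2 : Nat) * (2 ^ k * (R * 65536 % D)) = 2 ^ k * (2 * (R * 65536 % D)) from by ring,
          show D * 2 ^ k = 2 ^ k * D from by ring]
      exact ⟨fun hx => Nat.le_of_mul_le_mul_left hx (by positivity),
             fun hx => Nat.mul_le_mul_left _ hx⟩
    exact if_congr hiff rfl rfl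

-- ===== VERDICT (by name: the statement is the Claim_ definition above) =====
theorem fix16_div_py_spec : Claim_equal_fix16_div_py := by
  intro a b hdom
  unfold Spec_fix16_div_py
  have hdom' : a.natAbs ≤ 2147483648 ∧ b.natAbs ≤ 2147483648 := by
    unfold Dom_fix16_div_py pvDomInt at hdom
    simp only [Bool.and_eq_true, decide_eq_true_eq] at hdom
    omega
  by_cases hb : b = 0
  · subst hb; rfl
  · unfold fix16_div_py fix16_div_py_alt
    rw [dif_neg hb, if_neg hb]
    obtain ⟨k, h1, h2, h3⟩ := loop1_spec (a.natAbs - b.natAbs) a.natAbs b.natAbs 65536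
      (Int.natAbs_pos.mpr hb) (le_refl _)
    rw [if_neg (show ¬ (fixLoop1 a.natAbs b.natAbs 65536 (Int.natAbs_pos.mpr hb)).2 = 0 from by
          rw [h1]; simp)]
    exact congrArg (fun q : Nat =>
      if (decide (a < 0)) != (decide (b < 0)) then
        if (q : Int) = 2147483648 then -2147483648
        else pyToInt32 ((-(q : Int)).emod 4294967296)
      else pyToInt32 ((q : Int).emod 4294967296))
      (quot_eq a.natAbs b.natAbs (Int.natAbs_pos.mpr hb) hdom'.1 hdom'.2)
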